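-- pv_equiv track=rewrite | github.com/Jiezhi/myleetcode | src/1784-CheckIfBinaryStringHasAtMostOneSegmentOfOnes.py | checkOnesSegment
-- ===== SOURCE A (Python) =====
-- def checkOnesSegment(s: str) -> bool:
--     """
--     Runtime: 65 ms, faster than 15.78%
--     Memory Usage: 13.9 MB, less than 8.94%
--
--     1 <= s.length <= 100
--     s[i] is either '0' or '1'.
--     s[0] is '1'.
--     """
--     i, j = 0, len(s) - 1
--     while i <= j and s[i] == '0':
--         i += 1
--     if i > j:
--         return True
--     while j >= i and s[j] == '0':
--         j -= 1
--     while i <= j: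
--         if s[i] == '0':
--             return False
--         i += 1
--     return True
-- ===== SOURCE B (Python) =====
-- def checkOnesSegment(s: str) -> bool:
--     segments = 0
--     prev = '0'
--     for c in s:
--         if c != '0' and prev == '0':
--             segments += 1
--         prev = c
--     return segments <= 1
-- ===== Notes on version B (the rewrite author's own statement) =====
-- stated objective: faster
-- what changed: Replaces A's three separate index loops (trim leading zeros, trim trailing zeros, scan the middle for a zero) by a single left-to-right pass over the characters that counts the starts of maximal runs of non-zero characters and returns whether that count is at most 1.
import Mathlib
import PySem

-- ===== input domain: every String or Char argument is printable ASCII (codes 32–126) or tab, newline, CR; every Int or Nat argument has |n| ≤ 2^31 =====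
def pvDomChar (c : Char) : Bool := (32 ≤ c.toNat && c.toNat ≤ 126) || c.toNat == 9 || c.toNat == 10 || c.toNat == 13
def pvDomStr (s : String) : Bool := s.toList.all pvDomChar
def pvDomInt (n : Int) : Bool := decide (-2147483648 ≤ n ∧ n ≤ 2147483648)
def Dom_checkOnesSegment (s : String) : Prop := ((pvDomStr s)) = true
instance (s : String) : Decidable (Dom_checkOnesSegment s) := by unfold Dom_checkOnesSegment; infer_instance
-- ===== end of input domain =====

-- B replaces A's three index loops (trim leading zeros, trim trailing zeros, scan the middle)
-- by one left-to-right pass counting the starts of maximal non-'0' runs (measured faster in a timing run).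

-- ===== PORT A =====
-- while i <= j and s[i] == '0': i += 1
def pvA_loop1 (cs : List Char) (i j : Int) : Int :=
  if i ≤ j ∧ PySem.List.pyGet? cs i = some '0' then pvA_loop1 cs (i + 1) j else i
  termination_by (j + 1 - i).toNat
  decreasing_by omega

-- while j >= i and s[j] == '0': j -= 1
def pvA_loop2 (cs : List Char) (i j : Int) : Int :=
  if j ≥ i ∧ PySem.List.pyGet? cs j = some '0' then pvA_loop2 cs i (j - 1) else j
  termination_by (j + 1 - i).toNat
  decreasing_by omega

-- while i <= j: if s[i] == '0': return False; i += 1 / return True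
def pvA_loop3 (cs : List Char) (i j : Int) : Bool :=
  if i ≤ j then
    if PySem.List.pyGet? cs i = some '0' then false
    else pvA_loop3 cs (i + 1) j
  else true
  termination_by (j + 1 - i).toNat
  decreasing_by omega

def checkOnesSegment (s : String) : Bool :=
  let cs := s.toList
  let j : Int := (cs.length : Int) - 1
  let i := pvA_loop1 cs 0 j
  if i > j then true
  else
    let j2 := pvA_loop2 cs i j
    pvA_loop3 cs i j2

-- ===== PORT B =====
def checkOnesSegment_alt (s : String) : Bool :=
  let r := s.toList.foldl
    (fun (st : Nat × Char) c => (if c ≠ '0' ∧ st.2 = '0' then st.1 + 1 else st.1, c))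
    (0, '0')
  decide (r.1 ≤ 1)

-- ===== PRECONDITION & SPEC =====
def Spec_checkOnesSegment (s : String) (out : Bool) : Prop := out = checkOnesSegment_alt s
instance (s : String) (out : Bool) : Decidable (Spec_checkOnesSegment s out) := by unfold Spec_checkOnesSegment; infer_instance

-- ===== CLAIM (what is proved, stated in full; the proofs are below) =====
def Claim_equal_checkOnesSegment : Prop := ∀ (s : String), Dom_checkOnesSegment s → Spec_checkOnesSegment s (checkOnesSegment s)

-- ===== LEMMAS AND PROOFS =====

-- '0'-test used throughout the proofs
def pvZ (c : Char) : Bool := c == '0'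

-- number of maximal runs of non-'0' chars; `inside` = currently inside such a run
def pvRuns (inside : Bool) : List Char → Nat
  | [] => 0
  | c :: t => if c = '0' then pvRuns false t else if inside then pvRuns true t else 1 + pvRuns true t

-- right trim: remove trailing '0's (cons-structural)
def pvRT : List Char → List Char
  | [] => []
  | c :: t => match pvRT t with
    | [] => if c = '0' then [] else [c]
    | r => c :: r

lemma pvFoldB (cs : List Char) : ∀ (n : Nat) (p : Char),
    (cs.foldl (fun (st : Nat × Char) c => (if c ≠ '0' ∧ st.2 = '0' then st.1 + 1 else st.1, c)) (n, p)).1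
      = n + pvRuns (decide (p ≠ '0')) cs := by
  induction cs with
  | nil => intro n p; simp [pvRuns]
  | cons c t ih =>
    intro n p
    simp only [List.foldl_cons, ih, pvRuns]
    by_cases hc : c = '0' <;> by_cases hp : p = '0' <;> simp [hc, hp] <;> omega

lemma pvRuns_allZ (b : Bool) (cs : List Char) (h : ∀ c ∈ cs, c = '0') : pvRuns b cs = 0 := by
  induction cs generalizing b with
  | nil => simp [pvRuns]
  | cons c t ih =>
    have hc : c = '0' := h c (by simp)
    simp [pvRuns, hc, ih false (fun x hx => h x (by simp [hx]))]

lemma pvRuns_pos (cs : List Char) (h : ¬ ∀ c ∈ cs, c = '0') : 1 ≤ pvRuns false cs := by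
  induction cs with
  | nil => simp at h
  | cons c t ih =>
    by_cases hc : c = '0'
    · have hne : ¬ ∀ x ∈ t, x = '0' := by
        intro hall
        apply h
        intro x hx
        rcases List.mem_cons.mp hx with h1 | h2
        · rw [h1]; exact hc
        · exact hall x h2
      have := ih hne
      simpa [pvRuns, hc] using this
    · simp [pvRuns, hc]

lemma pvRT_eq_nil_iff (l : List Char) : pvRT l = [] ↔ ∀ c ∈ l, c = '0' := by
  induction l with
  | nil => simp [pvRT]
  | cons c t ih =>
    simp only [pvRT]
    cases hrt : pvRT t with
    | nil =>
      have hall := (ih).mp hrt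
      constructor
      · intro h x hx
        rcases List.mem_cons.mp hx with h1 | h2
        · subst h1
          by_contra hne
          rw [if_neg hne] at h
          simp at h
        · exact hall x h2
      · intro h
        rw [if_pos (h c (by simp))]
    | cons a s =>
      constructor
      · intro h; simp at h
      · intro h
        have hnil : pvRT t = [] := (ih).mpr (fun x hx => h x (List.mem_cons_of_mem _ hx))
        rw [hrt] at hnil
        simp at hnil

lemma pvQ (t : List Char) : pvRuns true t = 0 ↔ (pvRT t).any pvZ = false := by
  induction t with
  | nil => simp [pvRuns, pvRT]
  | cons c r ih =>
    by_cases hc : c = '0'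
    · rw [show pvRuns true (c :: r) = pvRuns false r from by simp [pvRuns, hc]]
      cases hrt : pvRT r with
      | nil =>
        have hall := (pvRT_eq_nil_iff r).mp hrt
        have h0 : pvRuns false r = 0 := pvRuns_allZ false r hall
        have hnil : pvRT (c :: r) = [] := by simp [pvRT, hrt, hc]
        simp [hnil, h0]
      | cons a s =>
        have hne : ¬ ∀ x ∈ r, x = '0' := by
          intro hall
          have := (pvRT_eq_nil_iff r).mpr hall
          rw [hrt] at this; simp at this
        have h1 := pvRuns_pos r hne
        have hany : (pvRT (c :: r)).any pvZ = true := by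
          simp [pvRT, hrt, pvZ, hc]
        rw [hany]
        constructor
        · intro h0; omega
        · intro h; simp at h
    · rw [show pvRuns true (c :: r) = pvRuns true r from by simp [pvRuns, hc]]
      have hany : (pvRT (c :: r)).any pvZ = (pvRT r).any pvZ := by
        cases hrt : pvRT r with
        | nil => simp [pvRT, hrt, hc, pvZ]
        | cons a s => simp [pvRT, hrt, pvZ, hc]
      rw [hany, ih]

-- master B-side characterization on the trimmed-left list
lemma pvC (d : List Char) (hd : d ≠ []) (hh : d.head hd ≠ '0') :
    (pvRuns false d ≤ 1) ↔ (pvRT d).any pvZ = false := by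
  rcases d with _ | ⟨c, t⟩
  · simp at hd
  · have hc : c ≠ '0' := by simpa using hh
    have hrun : pvRuns false (c :: t) = 1 + pvRuns true t := by simp [pvRuns, hc]
    have hany : (pvRT (c :: t)).any pvZ = (pvRT t).any pvZ := by
      cases hrt : pvRT t with
      | nil => simp [pvRT, hrt, hc, pvZ]
      | cons a s => simp [pvRT, hrt, pvZ, hc]
    rw [hrun, hany, ← pvQ]
    omega

lemma pvRuns_dropWhile (l : List Char) : pvRuns false (l.dropWhile pvZ) = pvRuns false l := by
  induction l with
  | nil => simp
  | cons c t ih =>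
    by_cases hc : c = '0'
    · simp [List.dropWhile_cons, pvZ, hc, ih, pvRuns]
    · simp [List.dropWhile_cons, pvZ, hc]

lemma pvDrop_takeWhile (p : Char → Bool) (l : List Char) :
    l.drop ((l.takeWhile p).length) = l.dropWhile p := by
  induction l with
  | nil => simp
  | cons c t ih =>
    by_cases hc : p c
    · simp [List.takeWhile_cons, List.dropWhile_cons, hc, ih]
    · simp [List.takeWhile_cons, List.dropWhile_cons, hc]

lemma pvRT_take (l : List Char) :
    pvRT l = l.take (l.length - (l.reverse.takeWhile pvZ).length) := by
  induction l with
  | nil => simp [pvRT]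
  | cons c t ih =>
    have hsplit : (c :: t).reverse.takeWhile pvZ
        = if (t.reverse.takeWhile pvZ).length = t.reverse.length
          then t.reverse ++ [c].takeWhile pvZ else t.reverse.takeWhile pvZ := by
      rw [List.reverse_cons, List.takeWhile_append]
    by_cases hfull : (t.reverse.takeWhile pvZ).length = t.reverse.length
    · have hall : ∀ x ∈ t, x = '0' := by
        have heq := List.IsPrefix.eq_of_length (List.takeWhile_prefix pvZ) hfull
        intro x hx
        have : pvZ x = true := (List.takeWhile_eq_self_iff.mp heq) x (by simpa using hx)
        simpa [pvZ] using this
      have hrt0 : pvRT t = [] := (pvRT_eq_nil_iff t).mpr hall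
      have hcz : pvRT (c :: t) = if c = '0' then [] else [c] := by
        simp only [pvRT]; rw [hrt0]
      by_cases hc : c = '0'
      · rw [hcz, if_pos hc, hsplit, if_pos hfull]
        have h1 : [c].takeWhile pvZ = [c] := by simp [pvZ, hc]
        rw [h1]
        simp
      · rw [hcz, if_neg hc, hsplit, if_pos hfull]
        have h1 : [c].takeWhile pvZ = [] := by simp [pvZ, hc]
        rw [h1]
        have h2 : (c :: t).length - t.reverse.length = 1 := by simp
        rw [List.append_nil, List.length_reverse] at *
        rw [show (c :: t).length - t.length = 1 from by simp]
        simp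
    · have hle : (t.reverse.takeWhile pvZ).length ≤ t.reverse.length :=
        (List.takeWhile_prefix pvZ).length_le
      have hlt : (t.reverse.takeWhile pvZ).length < t.length := by
        simp only [List.length_reverse] at hle hfull ⊢; omega
      have hrt : pvRT t ≠ [] := by
        intro h
        have hall := (pvRT_eq_nil_iff t).mp h
        apply hfull
        have : ∀ x ∈ t.reverse, pvZ x = true := by
          intro x hx; simp [pvZ, hall x (by simpa using hx)]
        rw [List.takeWhile_eq_self_iff.mpr this]
      have hcons : pvRT (c :: t) = c :: pvRT t := by
        cases hrtv : pvRT t with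
        | nil => exact absurd hrtv hrt
        | cons a s => simp [pvRT, hrtv]
      rw [hcons, ih, hsplit, if_neg hfull]
      rw [show (c :: t).length - (t.reverse.takeWhile pvZ).length
            = (t.length - (t.reverse.takeWhile pvZ).length) + 1 from by simp; omega]
      rw [List.take_succ_cons]

-- ===== loop lemmas for A =====
lemma pvL1 (cs : List Char) : ∀ (m k : Nat), cs.length - k = m → k ≤ cs.length →
    pvA_loop1 cs (k : Int) ((cs.length : Int) - 1)
      = (k : Int) + (((cs.drop k).takeWhile pvZ).length : Int) := by
  intro m
  induction m with
  | zero =>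
    intro k hm hk
    have hkn : k = cs.length := by omega
    rw [pvA_loop1]
    have : ¬ ((k : Int) ≤ (cs.length : Int) - 1 ∧ PySem.List.pyGet? cs (k : Int) = some '0') := by
      rintro ⟨h1, _⟩; omega
    rw [if_neg this]
    simp [hkn]
  | succ m ih =>
    intro k hm hk
    have hklt : k < cs.length := by omega
    have hget : PySem.List.pyGet? cs (k : Int) = some cs[k] := by
      rw [PySem.List.pyGet?_natCast]; simp [List.getElem?_eq_getElem hklt]
    have hdrop : cs.drop k = cs[k] :: cs.drop (k + 1) := List.drop_eq_getElem_cons hklt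
    rw [pvA_loop1]
    by_cases hc : cs[k] = '0'
    · have hguard : (k : Int) ≤ (cs.length : Int) - 1 ∧ PySem.List.pyGet? cs (k : Int) = some '0' := by
        constructor
        · omega
        · rw [hget, hc]
      rw [if_pos hguard]
      have : ((k : Nat) + 1 : Int) = (((k + 1 : Nat) : Int)) := by push_cast; ring
      rw [this, ih (k + 1) (by omega) (by omega)]
      rw [hdrop]
      simp [List.takeWhile_cons, pvZ, hc]
      push_cast; ring
    · have hguard : ¬ ((k : Int) ≤ (cs.length : Int) - 1 ∧ PySem.List.pyGet? cs (k : Int) = some '0') := by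
        rintro ⟨_, h2⟩
        rw [hget] at h2
        exact hc (by simpa using h2)
      rw [if_neg hguard, hdrop]
      simp [List.takeWhile_cons, pvZ, hc]

lemma pvL2 (cs : List Char) : ∀ (m i j : Nat), j - i = m → j < cs.length → i ≤ j →
    ∀ (hi : i < cs.length), cs[i]'hi ≠ '0' →
    pvA_loop2 cs (i : Int) (j : Int)
      = (j : Int) - ((((cs.take (j + 1)).reverse).takeWhile pvZ).length : Int) := by
  intro m
  induction m with
  | zero =>
    intro i j hm hj hij hi hne
    have : i = j := by omega
    subst this
    rw [pvA_loop2]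
    have hget : PySem.List.pyGet? cs (i : Int) = some cs[i] := by
      rw [PySem.List.pyGet?_natCast]; simp [List.getElem?_eq_getElem hi]
    have hguard : ¬ ((i : Int) ≥ (i : Int) ∧ PySem.List.pyGet? cs (i : Int) = some '0') := by
      rintro ⟨_, h2⟩; rw [hget] at h2; exact hne (by simpa using h2)
    rw [if_neg hguard]
    have htake : (cs.take (i + 1)).reverse = cs[i] :: (cs.take i).reverse := by
      rw [List.take_succ, List.getElem?_eq_getElem hi]
      simp
    rw [htake]
    simp [List.takeWhile_cons, pvZ, hne]
  | succ m ih =>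
    intro i j hm hj hij hi hne
    have hij' : i < j := by omega
    have hjlt : j < cs.length := hj
    have hgetj : PySem.List.pyGet? cs (j : Int) = some cs[j] := by
      rw [PySem.List.pyGet?_natCast]; simp [List.getElem?_eq_getElem hjlt]
    rw [pvA_loop2]
    by_cases hc : cs[j] = '0'
    · have hguard : (j : Int) ≥ (i : Int) ∧ PySem.List.pyGet? cs (j : Int) = some '0' := by
        exact ⟨by omega, by rw [hgetj, hc]⟩
      rw [if_pos hguard]
      have hcast : ((j : Int) - 1) = (((j - 1 : Nat) : Int)) := by omega
      rw [hcast, ih i (j - 1) (by omega) (by omega) (by omega) hi hne]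
      have htake : (cs.take (j + 1)).reverse = cs[j] :: (cs.take j).reverse := by
        rw [List.take_succ, List.getElem?_eq_getElem hjlt]; simp
      have htake' : j - 1 + 1 = j := by omega
      rw [htake, htake']
      simp [List.takeWhile_cons, pvZ, hc]
      omega
    · have hguard : ¬ ((j : Int) ≥ (i : Int) ∧ PySem.List.pyGet? cs (j : Int) = some '0') := by
        rintro ⟨_, h2⟩; rw [hgetj] at h2; exact hc (by simpa using h2)
      rw [if_neg hguard]
      have htake : (cs.take (j + 1)).reverse = cs[j] :: (cs.take j).reverse := by
        rw [List.take_succ, List.getElem?_eq_getElem hjlt]; simp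
      rw [htake]
      simp [List.takeWhile_cons, pvZ, hc]

lemma pvL3 (cs : List Char) : ∀ (m : Nat) (i : Nat) (j : Int), (j + 1 - (i : Int)).toNat = m →
    pvA_loop3 cs (i : Int) j = !((cs.drop i).take (j + 1 - (i : Int)).toNat).any pvZ := by
  intro m
  induction m with
  | zero =>
    intro i j hm
    rw [pvA_loop3]
    have : ¬ ((i : Int) ≤ j) := by omega
    rw [if_neg this, hm]
    simp
  | succ m ih =>
    intro i j hm
    have hij : (i : Int) ≤ j := by omega
    rw [pvA_loop3, if_pos hij]
    by_cases hilt : i < cs.length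
    · have hget : PySem.List.pyGet? cs (i : Int) = some cs[i] := by
        rw [PySem.List.pyGet?_natCast]; simp [List.getElem?_eq_getElem hilt]
      have hdrop : cs.drop i = cs[i] :: cs.drop (i + 1) := List.drop_eq_getElem_cons hilt
      by_cases hc : cs[i] = '0'
      · rw [if_pos (by rw [hget, hc])]
        rw [hdrop, hm]
        simp [List.take_succ_cons, List.any_cons, pvZ, hc]
      · rw [if_neg (by rw [hget]; intro h; exact hc (by simpa using h))]
        have hcast : ((i : Int) + 1) = (((i + 1 : Nat) : Int)) := by push_cast; ring
        rw [hcast, ih (i + 1) j (by push_cast; omega)]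
        have h2 : (j + 1 - ((i + 1 : Nat) : Int)).toNat = m := by push_cast; omega
        rw [hm, h2, hdrop, List.take_succ_cons]
        simp [pvZ, hc]
    · -- i beyond the list: both sides see the empty list
      have hnone : cs[i]? = none := List.getElem?_eq_none_iff.mpr (by omega)
      have hget : PySem.List.pyGet? cs (i : Int) = none := by
        rw [PySem.List.pyGet?_natCast, hnone]
      rw [if_neg (by rw [hget]; simp)]
      have hcast : ((i : Int) + 1) = (((i + 1 : Nat) : Int)) := by push_cast; ring
      rw [hcast, ih (i + 1) j (by push_cast; omega)]
      have h1 : cs.drop i = [] := List.drop_eq_nil_of_le (by omega)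
      have h2 : cs.drop (i + 1) = [] := List.drop_eq_nil_of_le (by omega)
      simp [h1, h2]

-- ===== master equivalence on lists =====
lemma pvMaster (cs : List Char) :
    (let j : Int := (cs.length : Int) - 1
     let i := pvA_loop1 cs 0 j
     if i > j then true
     else
       let j2 := pvA_loop2 cs i j
       pvA_loop3 cs i j2) = decide (pvRuns false cs ≤ 1) := by
  have hL1 := pvL1 cs (cs.length - 0) 0 rfl (by omega)
  simp only [Nat.cast_zero, List.drop_zero, zero_add] at hL1
  set i0 : Nat := ((cs.takeWhile pvZ).length) with hi0
  simp only [hL1]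
  by_cases hall : i0 = cs.length
  · -- every char is '0' (or the list is empty): A returns true, runs = 0
    have hallz : ∀ c ∈ cs, c = '0' := by
      have := List.IsPrefix.eq_of_length (List.takeWhile_prefix pvZ) (by rw [← hi0, hall])
      intro x hx
      simpa [pvZ] using (List.takeWhile_eq_self_iff.mp this) x hx
    rw [if_pos (by omega)]
    simp [pvRuns_allZ false cs hallz]
  · have hlt : i0 < cs.length := by
      have : i0 ≤ cs.length := by rw [hi0]; exact (List.takeWhile_prefix pvZ).length_le
      omega
    -- head of the trimmed list is not '0'
    have hlen : (cs.dropWhile pvZ).length = cs.length - (cs.takeWhile pvZ).length := by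
      rw [← pvDrop_takeWhile pvZ cs, List.length_drop]
    have hdropne : cs.dropWhile pvZ ≠ [] := by
      intro h
      have := congrArg List.length h
      rw [hlen] at this
      simp only [List.length_nil] at this
      omega
    have hhead : (cs.dropWhile pvZ).head hdropne ≠ '0' := by
      have := List.head_dropWhile_not pvZ hdropne
      simpa [pvZ] using this
    have hdropeq : cs.drop i0 = cs.dropWhile pvZ := by rw [hi0]; exact pvDrop_takeWhile pvZ cs
    have hi0get : cs[i0]'hlt ≠ '0' := by
      have h1 : cs.dropWhile pvZ = cs[i0] :: cs.drop (i0 + 1) := by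
        rw [← hdropeq]; exact List.drop_eq_getElem_cons hlt
      have hq : (cs.dropWhile pvZ).head? = some (cs[i0]'hlt) := by rw [h1]; rfl
      rw [List.head?_eq_head hdropne] at hq
      have hh2 : (cs.dropWhile pvZ).head hdropne = cs[i0]'hlt := Option.some.inj hq
      intro hEq
      exact hhead (hh2.trans hEq)
    rw [if_neg (by push_cast; omega)]
    -- the second loop
    have htaken : cs.take (cs.length - 1 + 1) = cs := by
      rw [show cs.length - 1 + 1 = cs.length from by omega]
      exact List.take_length
    have hL2 := pvL2 cs ((cs.length - 1) - i0) i0 (cs.length - 1) rfl (by omega) (by omega) hlt hi0get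
    rw [htaken] at hL2
    set t : Nat := ((cs.reverse.takeWhile pvZ).length) with ht
    -- t is the trailing-zero count; it misses the non-'0' char at i0, so i0 + t < n
    have htle : i0 + t < cs.length := by
      have hsplit : cs.reverse = (cs.dropWhile pvZ).reverse ++ (cs.takeWhile pvZ).reverse := by
        rw [← List.reverse_append, List.takeWhile_append_dropWhile]
      have hnotfull : ((cs.dropWhile pvZ).reverse.takeWhile pvZ).length ≠ (cs.dropWhile pvZ).reverse.length := by
        intro hfull
        have heq := List.IsPrefix.eq_of_length (List.takeWhile_prefix pvZ) hfull
        have hmem : (cs.dropWhile pvZ).head hdropne ∈ (cs.dropWhile pvZ).reverse := by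
          simp [List.head_mem]
        have := (List.takeWhile_eq_self_iff.mp heq) _ hmem
        simp [pvZ] at this
        exact hhead this
      have hteq : t = ((cs.dropWhile pvZ).reverse.takeWhile pvZ).length := by
        rw [ht, hsplit, List.takeWhile_append, if_neg hnotfull]
      have hlen2 : (cs.dropWhile pvZ).length = cs.length - i0 := by
        rw [hlen, ← hi0]
      have : ((cs.dropWhile pvZ).reverse.takeWhile pvZ).length ≤ (cs.dropWhile pvZ).reverse.length :=
        (List.takeWhile_prefix pvZ).length_le
      rw [List.length_reverse, hlen2] at this hnotfull
      omega
    have hcast2 : ((cs.length : Int) - 1) = (((cs.length - 1 : Nat) : Int)) := by omega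
    rw [hcast2, hL2]
    -- the third loop
    have hL3 := pvL3 cs ((((cs.length - 1 : Nat) : Int) - (t : Int) + 1 - (i0 : Int)).toNat) i0
      (((cs.length - 1 : Nat) : Int) - (t : Int)) rfl
    rw [hL3]
    have hmid : ((((cs.length - 1 : Nat) : Int)) - (t : Int) + 1 - (i0 : Int)).toNat = cs.length - t - i0 := by
      omega
    rw [hmid, hdropeq]
    -- identify the middle with pvRT of the trimmed list
    have hrt : pvRT (cs.dropWhile pvZ) = (cs.dropWhile pvZ).take (cs.length - t - i0) := by
      rw [pvRT_take]
      congr 1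
      have hsplit : cs.reverse = (cs.dropWhile pvZ).reverse ++ (cs.takeWhile pvZ).reverse := by
        rw [← List.reverse_append, List.takeWhile_append_dropWhile]
      have hnotfull : ((cs.dropWhile pvZ).reverse.takeWhile pvZ).length ≠ (cs.dropWhile pvZ).reverse.length := by
        intro hfull
        have heq := List.IsPrefix.eq_of_length (List.takeWhile_prefix pvZ) hfull
        have hmem : (cs.dropWhile pvZ).head hdropne ∈ (cs.dropWhile pvZ).reverse := by
          simp [List.head_mem]
        have := (List.takeWhile_eq_self_iff.mp heq) _ hmem
        simp [pvZ] at this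
        exact hhead this
      have hteq : t = ((cs.dropWhile pvZ).reverse.takeWhile pvZ).length := by
        rw [ht, hsplit, List.takeWhile_append, if_neg hnotfull]
      have hlen2 : (cs.dropWhile pvZ).length = cs.length - i0 := by
        rw [hlen, ← hi0]
      rw [← hteq, hlen]
      omega
    rw [← hrt]
    -- B side: drop the leading zeros, then apply the characterization
    have hB : pvRuns false cs = pvRuns false (cs.dropWhile pvZ) := (pvRuns_dropWhile cs).symm
    rw [show (decide (pvRuns false cs ≤ 1)) = decide (pvRuns false (cs.dropWhile pvZ) ≤ 1) from by rw [hB]]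
    have hC := pvC (cs.dropWhile pvZ) hdropne hhead
    by_cases hq : pvRuns false (cs.dropWhile pvZ) ≤ 1
    · simp [hq, hC.mp hq]
    · have : (pvRT (cs.dropWhile pvZ)).any pvZ = true := by
        by_contra h
        exact hq (hC.mpr (by simpa using h))
      simp [hq, this]

lemma pvAltEq (s : String) : checkOnesSegment_alt s = decide (pvRuns false s.toList ≤ 1) := by
  unfold checkOnesSegment_alt
  simp [pvFoldB]

-- ===== VERDICT (by name: the statement is the Claim_ definition above) =====
theorem checkOnesSegment_spec : Claim_equal_checkOnesSegment := by
  intro s _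
  unfold Spec_checkOnesSegment
  rw [pvAltEq]
  exact pvMaster s.toList
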